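-- pv_equiv track=rewrite | github.com/moongni/Algorithm | 프로그래머스/wintercoding 기출/지형편집.py | solution
-- ===== SOURCE A (Python) =====
-- def solution(land, P, Q):
--     N = len(land)
--     arr = []
--     for i in range(N):
--         for j in range(N):
--             arr.append(land[i][j])
--     arr.sort()
--     n = len(arr)
--
--     answer = removed = (sum(arr) - arr[0] * n) * Q
--     prev_height = arr[0]
--     fill = 0
--     for i in range(1, N ** 2):
--         if arr[i - 1] == arr[i]:
--             continue
--
--         fill += (arr[i] - prev_height) * i * P
--         removed -= (arr[i] - prev_height) * (n - i) * Q
--         cost = fill + removed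
--         answer = min(answer, cost)
--         prev_height = arr[i]
--
--     return answer
-- ===== SOURCE B (Python) =====
-- def solution(land, P, Q):
--     N = len(land)
--     cells = [row[j] for row in land for j in range(N)]
--     best = None
--     for h in set(cells):
--         cost = 0
--         for x in cells:
--             cost += P * (h - x) if x < h else Q * (x - h)
--         if best is None or cost < best:
--             best = cost
--     return best
-- ===== Notes on version B (the rewrite author's own statement) =====
-- stated objective: alternative
-- what changed: B eliminates the sort and the incremental fill/removed accumulators entirely: it collects the distinct heights into a set and, for each candidate height, recomputes the whole leveling cost P*(h-x) / Q*(x-h) by a direct pass over all cells, taking the minimum (A instead sorts all cells and sweeps them once with delta updates).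
import Mathlib
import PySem

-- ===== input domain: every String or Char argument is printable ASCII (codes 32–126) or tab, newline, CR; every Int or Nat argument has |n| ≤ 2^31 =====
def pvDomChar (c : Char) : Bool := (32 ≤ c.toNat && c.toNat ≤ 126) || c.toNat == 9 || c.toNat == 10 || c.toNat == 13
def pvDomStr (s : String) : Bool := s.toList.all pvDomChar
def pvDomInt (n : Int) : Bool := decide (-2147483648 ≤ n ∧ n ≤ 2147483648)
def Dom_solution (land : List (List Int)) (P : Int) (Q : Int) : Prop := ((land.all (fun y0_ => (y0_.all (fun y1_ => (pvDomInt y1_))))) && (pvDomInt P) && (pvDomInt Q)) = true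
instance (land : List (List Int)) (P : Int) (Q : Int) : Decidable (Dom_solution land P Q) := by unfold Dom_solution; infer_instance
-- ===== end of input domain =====

-- B drops the sort and the incremental accumulators: it recomputes the full leveling cost
-- per distinct height (a set) by a direct pass over all cells and takes the minimum
-- (objective: alternative algorithm, different cost profile; return-value equivalence).


-- ===== PORT A =====
def solution (land : List (List Int)) (P : Int) (Q : Int) : Int :=
  let N : Int := land.length
  let arr : List Int := (PySem.List.pyRange 0 N 1).foldl (fun a i =>
    (PySem.List.pyRange 0 N 1).foldl (fun a j =>
      a ++ [PySem.List.pyGetD (PySem.List.pyGetD land i []) j 0]) a) []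
  let arr := PySem.List.sorted arr (fun x => x) false
  let n : Int := arr.length
  let answer : Int := (arr.sum - PySem.List.pyGetD arr 0 0 * n) * Q
  let st := (PySem.List.pyRange 1 (N ^ 2) 1).foldl (fun (st : Int × Int × Int × Int) i =>
      if PySem.List.pyGetD arr (i - 1) 0 = PySem.List.pyGetD arr i 0 then st
      else
        let fill := st.2.2.1 + (PySem.List.pyGetD arr i 0 - st.2.2.2) * i * P
        let removed := st.2.1 - (PySem.List.pyGetD arr i 0 - st.2.2.2) * (n - i) * Q
        let cost := fill + removed
        (min st.1 cost, removed, fill, PySem.List.pyGetD arr i 0))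
    (answer, answer, 0, PySem.List.pyGetD arr 0 0)
  st.1

-- ===== PORT B =====
-- B's inner loop: cost = 0; for x in cells: cost += P*(h-x) if x < h else Q*(x-h)
def pvCostAt (cells : List Int) (P Q h : Int) : Int :=
  cells.foldl (fun c x => c + (if x < h then P * (h - x) else Q * (x - h))) 0
-- B's outer loop body: keep the smaller of the running best (None at first) and this cost
def pvBstep (cells : List Int) (P Q : Int) (best : Option Int) (h : Int) : Option Int :=
  let cost := pvCostAt cells P Q h
  match best with
  | none => some cost
  | some b => if cost < b then some cost else some b
-- cells = [row[j] for row in land for j in range(N)]; brute-force minimum over set(cells)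
def solution_alt (land : List (List Int)) (P : Int) (Q : Int) : Int :=
  let N : Int := land.length
  let cells : List Int := land.flatMap (fun row =>
    (PySem.List.pyRange 0 N 1).map (fun j => PySem.List.pyGetD row j 0))
  let best := (PySem.Set.ofList cells).foldl (pvBstep cells P Q) none
  best.getD 0

-- ===== PRECONDITION & SPEC =====
-- Pre_ excludes exactly the inputs on which A raises: empty land (arr[0] IndexError) and
-- any row shorter than len(land) (land[i][j] IndexError).
def Pre_solution (land : List (List Int)) (P : Int) (Q : Int) : Prop :=
  land ≠ [] ∧ ∀ row ∈ land, land.length ≤ row.length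
instance (land : List (List Int)) (P : Int) (Q : Int) : Decidable (Pre_solution land P Q) := by
  unfold Pre_solution; infer_instance
def pvWitness_solution : List (List Int) × Int × Int := ([[1, 3], [2, 2]], 2, 3)

def Spec_solution (land : List (List Int)) (P : Int) (Q : Int) (out : Int) : Prop := out = solution_alt land P Q
instance (land : List (List Int)) (P : Int) (Q : Int) (out : Int) : Decidable (Spec_solution land P Q out) := by unfold Spec_solution; infer_instance

-- ===== CLAIM (what is proved, stated in full; the proofs are below) =====
def Claim_equal_solution : Prop := ∀ (land : List (List Int)) (P : Int) (Q : Int), Dom_solution land P Q → Pre_solution land P Q → Spec_solution land P Q (solution land P Q)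

-- ===== LEMMAS AND PROOFS =====

-- prefix sum of the first k cells of the sorted list
def pvPre (s : List Int) (k : Nat) : Int := (s.take k).sum
-- the k-th sorted cell (0 default; only used for k < length)
def pvG (s : List Int) (k : Nat) : Int := s.getD k 0
-- A's cost of leveling to height s[k], in prefix-sum form (A's loop invariant)
def pvCost (s : List Int) (P Q : Int) (k : Nat) : Int :=
  P * (pvG s k * k - pvPre s k) + Q * (s.sum - pvPre s k - pvG s k * ((s.length : Int) - k))
-- running minimum of the costs at positions 0..k
def pvM (s : List Int) (P Q : Int) : Nat → Int
  | 0 => pvCost s P Q 0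
  | k + 1 => min (pvM s P Q k) (pvCost s P Q (k + 1))
-- B's per-cell cost summand and total cost of leveling to height h
def pvF (P Q h x : Int) : Int := if x < h then P * (h - x) else Q * (x - h)
def pvC (P Q : Int) (cells : List Int) (h : Int) : Int := (cells.map (pvF P Q h)).sum
-- the min-fold B performs over the candidate heights
def pvMinF (g : Int → Int) (l : List Int) (b : Int) : Int := l.foldl (fun m h => min m (g h)) b

lemma pv_map_getD_range {α : Type} (xs : List α) (n : Nat) (d : α) (h : n ≤ xs.length) :
    (List.range n).map (fun k => xs.getD k d) = xs.take n := by
  induction n with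
  | zero => simp
  | succ m ih =>
      rw [List.range_succ, List.map_append, ih (by omega), List.take_add_one]
      simp [List.getElem?_eq_getElem (show m < xs.length by omega)]

lemma pv_pre_succ (s : List Int) (k : Nat) (h : k < s.length) :
    pvPre s (k + 1) = pvPre s k + pvG s k := by
  unfold pvPre pvG
  rw [List.take_add_one, List.getElem?_eq_getElem h, Option.toList_some, List.sum_append,
      List.getD_eq_getElem s 0 h, List.sum_cons, List.sum_nil, add_zero]

lemma pv_M_le (s : List Int) (P Q : Int) (k : Nat) : pvM s P Q k ≤ pvCost s P Q k := by
  cases k with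
  | zero => exact le_refl _
  | succ m => exact min_le_right _ _

lemma pv_cost_dup (s : List Int) (P Q : Int) (k : Nat) (h : k < s.length)
    (hg : pvG s k = pvG s (k + 1)) : pvCost s P Q (k + 1) = pvCost s P Q k := by
  unfold pvCost
  rw [pv_pre_succ s k h, ← hg]
  push_cast
  ring

-- A's flattening double index loop builds the row[:N]-truncated cell list
lemma pv_flatA (land : List (List Int)) (h : ∀ row ∈ land, land.length ≤ row.length) :
    (PySem.List.pyRange 0 (land.length : Int) 1).foldl
      (fun a i => (PySem.List.pyRange 0 (land.length : Int) 1).foldl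
        (fun a j => a ++ [PySem.List.pyGetD (PySem.List.pyGetD land i []) j 0]) a) []
    = land.flatMap (fun row => row.take land.length) := by
  have hinner : ∀ (a : List Int) (i : Int),
      (PySem.List.pyRange 0 (land.length : Int) 1).foldl
        (fun a j => a ++ [PySem.List.pyGetD (PySem.List.pyGetD land i []) j 0]) a
      = a ++ (List.range land.length).map
          (fun k => (PySem.List.pyGetD land i []).getD k 0) := by
    intro a i
    rw [PySem.List.pyRange_zero_nat,
        PySem.List.foldl_append_singleton_eq_map
          (fun j => PySem.List.pyGetD (PySem.List.pyGetD land i []) j 0), List.map_map]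
    simp [PySem.List.pyGetD_natCast]
  simp only [hinner]
  rw [PySem.List.foldl_append_eq_flatMap
        (fun i => (List.range land.length).map
          (fun k => (PySem.List.pyGetD land i []).getD k 0)),
      List.nil_append, PySem.List.pyRange_zero_nat, List.flatMap_map]
  have hland : (List.range land.length).map (fun k => land.getD k []) = land := by
    rw [pv_map_getD_range land land.length [] (le_refl _)]; exact List.take_length ..
  have hpt : ∀ k ∈ List.range land.length,
      (List.range land.length).map (fun j => (PySem.List.pyGetD land (k : Int) []).getD j 0)
      = (land.getD k []).take land.length := by
    intro k hk
    rw [PySem.List.pyGetD_natCast]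
    exact pv_map_getD_range (land.getD k []) land.length 0
      (h _ (by
        have hk' : k < land.length := List.mem_range.mp hk
        rw [List.getD_eq_getElem land [] hk']
        exact List.getElem_mem hk'))
  rw [List.flatMap_congr hpt, ← List.flatMap_map (fun k => land.getD k [])
        (fun row => row.take land.length) (List.range land.length), hland]

-- B's comprehension builds the same row[:N]-truncated cell list
lemma pv_flatB (land : List (List Int)) (h : ∀ row ∈ land, land.length ≤ row.length) :
    land.flatMap (fun row =>
      (PySem.List.pyRange 0 (land.length : Int) 1).map (fun j => PySem.List.pyGetD row j 0))
    = land.flatMap (fun row => row.take land.length) := by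
  apply List.flatMap_congr
  intro row hr
  rw [PySem.List.pyRange_zero_nat, List.map_map]
  have hc : ((fun j => PySem.List.pyGetD row j 0) ∘ fun (j : Nat) => (j : Int))
      = fun j : Nat => row.getD j 0 := by
    funext j; exact PySem.List.pyGetD_natCast ..
  rw [hc]
  exact pv_map_getD_range row land.length 0 (h row hr)

-- A's loop invariant: after iterations 1..m the state is
-- (running min of costs 0..m, removed at m, fill at m, height at m)
lemma pv_aInv (s : List Int) (P Q : Int) (m : Nat) (hm : m < s.length) :
    (PySem.List.pyRange 1 ((m : Int) + 1) 1).foldl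
      (fun (st : Int × Int × Int × Int) i =>
        if PySem.List.pyGetD s (i - 1) 0 = PySem.List.pyGetD s i 0 then st
        else
          (min st.1 (st.2.2.1 + (PySem.List.pyGetD s i 0 - st.2.2.2) * i * P +
              (st.2.1 - (PySem.List.pyGetD s i 0 - st.2.2.2) * ((s.length : Int) - i) * Q)),
           st.2.1 - (PySem.List.pyGetD s i 0 - st.2.2.2) * ((s.length : Int) - i) * Q,
           st.2.2.1 + (PySem.List.pyGetD s i 0 - st.2.2.2) * i * P,
           PySem.List.pyGetD s i 0))
      ((s.sum - PySem.List.pyGetD s 0 0 * (s.length : Int)) * Q,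
       (s.sum - PySem.List.pyGetD s 0 0 * (s.length : Int)) * Q, 0,
       PySem.List.pyGetD s 0 0)
    = (pvM s P Q m,
       Q * (s.sum - pvPre s m - pvG s m * ((s.length : Int) - (m : Int))),
       P * (pvG s m * (m : Int) - pvPre s m),
       pvG s m) := by
  induction m with
  | zero =>
      rw [show ((0 : Nat) : Int) + 1 = 1 by norm_num,
          PySem.List.pyRange_one_eq_nil (le_refl 1), List.foldl_nil]
      unfold pvM pvCost pvPre pvG
      rw [PySem.List.pyGetD_zero]
      simp only [Prod.mk.injEq]
      refine ⟨?_, ?_, ?_⟩ <;> simp [List.take_zero] <;> ring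
  | succ m ih =>
      have hm' : m < s.length := by omega
      rw [show (((m + 1 : Nat)) : Int) + 1 = ((m : Int) + 1) + 1 by push_cast; ring,
          PySem.List.pyRange_one_succ_right (by
            have : (0 : Int) ≤ (m : Int) := Int.natCast_nonneg m
            omega),
          List.foldl_append, ih hm', List.foldl_cons, List.foldl_nil]
      rw [show ((m : Int) + 1) - 1 = (m : Int) by ring, PySem.List.pyGetD_natCast,
          show ((m : Int) + 1) = (((m + 1 : Nat)) : Int) by push_cast; ring,
          PySem.List.pyGetD_natCast]
      have hps := pv_pre_succ s m hm'
      by_cases hg : pvG s m = pvG s (m + 1)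
      · rw [if_pos (by simpa [pvG] using hg)]
        have hdup := pv_cost_dup s P Q m hm' hg
        have hple := pv_M_le s P Q m
        simp only [Prod.mk.injEq]
        refine ⟨?_, ?_, ?_, hg⟩
        · show pvM s P Q m = pvM s P Q (m + 1)
          rw [show pvM s P Q (m + 1) = min (pvM s P Q m) (pvCost s P Q (m + 1)) from rfl,
              hdup, min_eq_left hple]
        · rw [hps, ← hg]; push_cast; ring
        · rw [hps, ← hg]; push_cast; ring
      · rw [if_neg (by simpa [pvG] using hg)]
        have hfill : P * (pvG s m * (m : Int) - pvPre s m) +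
            (s.getD (m + 1) 0 - pvG s m) * (((m + 1 : Nat)) : Int) * P
            = P * (pvG s (m + 1) * (((m + 1 : Nat)) : Int) - pvPre s (m + 1)) := by
          rw [hps]; unfold pvG; push_cast; ring
        have hrem : Q * (s.sum - pvPre s m - pvG s m * ((s.length : Int) - (m : Int))) -
            (s.getD (m + 1) 0 - pvG s m) * ((s.length : Int) - (((m + 1 : Nat)) : Int)) * Q
            = Q * (s.sum - pvPre s (m + 1) -
                pvG s (m + 1) * ((s.length : Int) - (((m + 1 : Nat)) : Int))) := by
          rw [hps]; unfold pvG; push_cast; ring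
        simp only [Prod.mk.injEq]
        refine ⟨?_, hrem, hfill, rfl⟩
        rw [hfill, hrem,
            show pvM s P Q (m + 1) = min (pvM s P Q m) (pvCost s P Q (m + 1)) from rfl]
        rfl

-- summing B's per-cell cost over cells that are all ≤ h gives the P (raise) closed form
lemma pv_sum_le (P Q h : Int) (l : List Int) (hall : ∀ x ∈ l, x ≤ h) :
    (l.map (pvF P Q h)).sum = P * (h * l.length - l.sum) := by
  induction l with
  | nil => simp
  | cons a t ih =>
      have ha : a ≤ h := hall a (by simp)
      rw [List.map_cons, List.sum_cons, ih (fun x hx => hall x (by simp [hx]))]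
      unfold pvF
      by_cases hlt : a < h
      · rw [if_pos hlt]; simp only [List.length_cons, List.sum_cons]; push_cast; ring
      · have he : a = h := le_antisymm ha (not_lt.mp hlt)
        subst he
        rw [if_neg hlt]; simp only [List.length_cons, List.sum_cons]; push_cast; ring

-- and over cells that are all ≥ h, the Q (lower) closed form
lemma pv_sum_ge (P Q h : Int) (l : List Int) (hall : ∀ x ∈ l, h ≤ x) :
    (l.map (pvF P Q h)).sum = Q * (l.sum - h * l.length) := by
  induction l with
  | nil => simp
  | cons a t ih =>
      have ha : h ≤ a := hall a (by simp)
      rw [List.map_cons, List.sum_cons, ih (fun x hx => hall x (by simp [hx]))]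
      unfold pvF
      rw [if_neg (not_lt.mpr ha)]; simp only [List.length_cons, List.sum_cons]; push_cast; ring

-- B's total cost only depends on the multiset of cells
lemma pv_C_perm (P Q : Int) {l l' : List Int} (hp : l.Perm l') (h : Int) :
    pvC P Q l h = pvC P Q l' h := (hp.map (pvF P Q h)).sum_eq

-- on a sorted list, A's prefix-sum cost at position k IS B's brute-force cost at height s[k]
lemma pv_cost_eq_C (s : List Int) (P Q : Int) (hs : s.Pairwise (· ≤ ·)) (k : Nat)
    (hk : k < s.length) : pvCost s P Q k = pvC P Q s (pvG s k) := by
  have hg : pvG s k = s[k] := List.getD_eq_getElem s 0 hk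
  rw [List.pairwise_iff_getElem] at hs
  have htake : ∀ x ∈ s.take k, x ≤ s[k] := by
    intro x hx
    obtain ⟨i, hi, hxe⟩ := List.mem_iff_getElem.mp hx
    have hik : i < k := by
      have := hi; rw [List.length_take] at this; omega
    rw [List.getElem_take] at hxe
    rw [← hxe]
    exact hs i k (by omega) hk hik
  have hdrop : ∀ x ∈ s.drop k, s[k] ≤ x := by
    intro x hx
    obtain ⟨i, hi, hxe⟩ := List.mem_iff_getElem.mp hx
    have hki : k + i < s.length := by
      have := hi; rw [List.length_drop] at this; omega
    rw [List.getElem_drop] at hxe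
    rw [← hxe]
    rcases Nat.eq_zero_or_pos i with h0 | h0
    · subst h0; exact le_refl _
    · exact hs k (k + i) hk hki (by omega)
  have hsplit : ∀ hh : Int, (s.map (pvF P Q hh)).sum
      = ((s.take k).map (pvF P Q hh)).sum + ((s.drop k).map (pvF P Q hh)).sum := by
    intro hh
    conv_lhs => rw [← List.take_append_drop k s]
    rw [List.map_append, List.sum_append]
  have hsum : (s.take k).sum + (s.drop k).sum = s.sum := by
    rw [← List.sum_append, List.take_append_drop]
  have hd : (s.drop k).sum = s.sum - (s.take k).sum := by omega
  unfold pvC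
  rw [hg, hsplit s[k], pv_sum_le P Q s[k] _ htake, pv_sum_ge P Q s[k] _ hdrop,
      List.length_take, min_eq_left hk.le, List.length_drop, hd]
  unfold pvCost pvPre
  rw [hg, Nat.cast_sub hk.le]

-- the running minimum is a lower bound of all costs seen so far …
lemma pv_M_le_all (s : List Int) (P Q : Int) :
    ∀ k j, j ≤ k → pvM s P Q k ≤ pvCost s P Q j := by
  intro k
  induction k with
  | zero =>
      intro j hj
      have : j = 0 := by omega
      subst this; exact le_refl _
  | succ m ih =>
      intro j hj
      rcases Nat.lt_or_ge j (m + 1) with hlt | hge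
      · exact le_trans (min_le_left _ _) (ih j (by omega))
      · have : j = m + 1 := by omega
        subst this; exact min_le_right _ _
-- … and is attained at one of them
lemma pv_M_mem (s : List Int) (P Q : Int) :
    ∀ k, ∃ j, j ≤ k ∧ pvM s P Q k = pvCost s P Q j := by
  intro k
  induction k with
  | zero => exact ⟨0, le_refl _, rfl⟩
  | succ m ih =>
      obtain ⟨j, hj, he⟩ := ih
      rcases min_cases (pvM s P Q m) (pvCost s P Q (m + 1)) with ⟨hm, _⟩ | ⟨hm, _⟩
      · exact ⟨j, by omega, by rw [show pvM s P Q (m + 1) = min (pvM s P Q m) (pvCost s P Q (m + 1)) from rfl, hm, he]⟩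
      · exact ⟨m + 1, le_refl _, by rw [show pvM s P Q (m + 1) = min (pvM s P Q m) (pvCost s P Q (m + 1)) from rfl, hm]⟩

-- B's inner loop computes exactly the brute-force cost pvC
lemma pv_costAt (cells : List Int) (P Q h : Int) : pvCostAt cells P Q h = pvC P Q cells h := by
  unfold pvCostAt
  show cells.foldl (fun c x => c + pvF P Q h x) 0 = _
  have hfa : ∀ (l : List Int) (a : Int), l.foldl (fun c x => c + pvF P Q h x) a
      = a + (l.map (pvF P Q h)).sum := by
    intro l
    induction l with
    | nil => intro a; simp
    | cons y ys ihy => intro a; rw [List.foldl_cons, ihy, List.map_cons, List.sum_cons]; ring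
  rw [hfa, zero_add]
  rfl

lemma pv_bstep_none (cells : List Int) (P Q h : Int) :
    pvBstep cells P Q none h = some (pvC P Q cells h) := by
  unfold pvBstep
  rw [pv_costAt]

lemma pv_bstep_some (cells : List Int) (P Q b h : Int) :
    pvBstep cells P Q (some b) h = some (min b (pvC P Q cells h)) := by
  unfold pvBstep
  rw [pv_costAt]
  show (if pvC P Q cells h < b then some (pvC P Q cells h) else some b) = _
  split_ifs with hc
  · rw [min_eq_right (le_of_lt hc)]
  · rw [min_eq_left (not_lt.mp hc)]

-- B's option-min fold, once seeded, is a plain min fold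
lemma pv_bfold_some (cells : List Int) (P Q : Int) :
    ∀ (L : List Int) (b : Int),
    L.foldl (pvBstep cells P Q) (some b) = some (pvMinF (pvC P Q cells) L b) := by
  intro L
  induction L with
  | nil => intro b; rfl
  | cons a t ih =>
      intro b
      rw [List.foldl_cons, pv_bstep_some, ih]
      rfl

-- the min fold is a lower bound of the seed and of every candidate …
lemma pv_minF_le (g : Int → Int) :
    ∀ (L : List Int) (b : Int), pvMinF g L b ≤ b ∧ ∀ x ∈ L, pvMinF g L b ≤ g x := by
  intro L
  induction L with
  | nil => intro b; exact ⟨le_refl _, by simp⟩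
  | cons a t ih =>
      intro b
      have h := ih (min b (g a))
      refine ⟨le_trans h.1 (min_le_left _ _), ?_⟩
      intro x hx
      rcases List.mem_cons.mp hx with he | ht
      · subst he; exact le_trans h.1 (min_le_right _ _)
      · exact h.2 x ht
-- … and is attained at the seed or at one of them
lemma pv_minF_mem (g : Int → Int) :
    ∀ (L : List Int) (b : Int), pvMinF g L b = b ∨ ∃ x ∈ L, pvMinF g L b = g x := by
  intro L
  induction L with
  | nil => intro b; exact Or.inl rfl
  | cons a t ih =>
      intro b
      rcases ih (min b (g a)) with he | ⟨x, hx, he⟩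
      · show pvMinF g t (min b (g a)) = b ∨ _
        rcases min_cases b (g a) with ⟨hm, _⟩ | ⟨hm, _⟩
        · exact Or.inl (by show pvMinF g t (min b (g a)) = b; rw [he, hm])
        · exact Or.inr ⟨a, by simp, by show pvMinF g t (min b (g a)) = g a; rw [he, hm]⟩
      · exact Or.inr ⟨x, by simp [hx], he⟩

-- the two programs' cores agree on any non-empty cell list
lemma pv_core (cells s : List Int) (P Q : Int) (hne : cells ≠ [])
    (hsort : s = PySem.List.sorted cells (fun x => x) false) :
    ((PySem.List.pyRange 1 ((((s.length - 1 : Nat)) : Int) + 1) 1).foldl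
      (fun (st : Int × Int × Int × Int) i =>
        if PySem.List.pyGetD s (i - 1) 0 = PySem.List.pyGetD s i 0 then st
        else
          (min st.1 (st.2.2.1 + (PySem.List.pyGetD s i 0 - st.2.2.2) * i * P +
              (st.2.1 - (PySem.List.pyGetD s i 0 - st.2.2.2) * ((s.length : Int) - i) * Q)),
           st.2.1 - (PySem.List.pyGetD s i 0 - st.2.2.2) * ((s.length : Int) - i) * Q,
           st.2.2.1 + (PySem.List.pyGetD s i 0 - st.2.2.2) * i * P,
           PySem.List.pyGetD s i 0))
      ((s.sum - PySem.List.pyGetD s 0 0 * (s.length : Int)) * Q,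
       (s.sum - PySem.List.pyGetD s 0 0 * (s.length : Int)) * Q, 0,
       PySem.List.pyGetD s 0 0)).1
    = (((PySem.Set.ofList cells).foldl (pvBstep cells P Q) none).getD 0) := by
  have hperm : s.Perm cells := hsort ▸ PySem.List.sorted_perm cells (fun x => x) false
  have hpair : s.Pairwise (· ≤ ·) := by
    rw [hsort]; simpa using PySem.List.sorted_pairwise cells (fun x => x)
  have hsne : s ≠ [] := by
    intro h
    apply hne
    have := hperm.length_eq
    rw [h] at this
    exact List.eq_nil_of_length_eq_zero this.symm
  have hn0 : 0 < s.length := List.length_pos_iff.mpr hsne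
  rw [pv_aInv s P Q (s.length - 1) (by omega)]
  have hLne : PySem.Set.ofList cells ≠ [] := by
    obtain ⟨c, t, hc⟩ := List.exists_cons_of_ne_nil hne
    intro hLe
    have : c ∈ PySem.Set.ofList cells := (PySem.Set.mem_ofList cells c).mpr (by rw [hc]; simp)
    rw [hLe] at this
    exact absurd this (List.not_mem_nil)
  obtain ⟨h₀, t, hL⟩ := List.exists_cons_of_ne_nil hLne
  rw [hL, List.foldl_cons, pv_bstep_none, pv_bfold_some, Option.getD_some]
  show pvM s P Q (s.length - 1) = pvMinF (pvC P Q cells) t (pvC P Q cells h₀)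
  have hmemL : ∀ h : Int, h ∈ h₀ :: t ↔ h ∈ s := by
    intro h
    rw [← hL, PySem.Set.mem_ofList, hperm.mem_iff]
  apply le_antisymm
  · -- A's minimum ≤ B's minimum: B's result is some candidate cost, which A also considered
    have hb := pv_minF_mem (pvC P Q cells) t (pvC P Q cells h₀)
    have hcand : ∃ h ∈ h₀ :: t, pvMinF (pvC P Q cells) t (pvC P Q cells h₀) = pvC P Q cells h := by
      rcases hb with he | ⟨x, hx, he⟩
      · exact ⟨h₀, by simp, he⟩
      · exact ⟨x, by simp [hx], he⟩
    obtain ⟨h, hhL, he⟩ := hcand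
    have hhs : h ∈ s := (hmemL h).mp hhL
    obtain ⟨i, hi, hie⟩ := List.mem_iff_getElem.mp hhs
    have hgi : pvG s i = h := by rw [pvG, List.getD_eq_getElem s 0 hi, hie]
    rw [he, ← pv_C_perm P Q hperm h, ← hgi, ← pv_cost_eq_C s P Q hpair i hi]
    exact pv_M_le_all s P Q (s.length - 1) i (by omega)
  · -- B's minimum ≤ A's minimum: A's result is the cost at some position, whose height is in the set
    obtain ⟨j, hj, he⟩ := pv_M_mem s P Q (s.length - 1)
    have hjlt : j < s.length := by omega
    have hgs : pvG s j ∈ s := by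
      rw [pvG, List.getD_eq_getElem s 0 hjlt]
      exact List.getElem_mem hjlt
    have hgL : pvG s j ∈ h₀ :: t := (hmemL _).mpr hgs
    have hce : pvCost s P Q j = pvC P Q cells (pvG s j) := by
      rw [pv_cost_eq_C s P Q hpair j hjlt, pv_C_perm P Q hperm]
    rw [he, hce]
    rcases List.mem_cons.mp hgL with h0 | ht
    · rw [← h0]
      exact (pv_minF_le (pvC P Q cells) t (pvC P Q cells (pvG s j))).1
    · exact (pv_minF_le (pvC P Q cells) t (pvC P Q cells h₀)).2 _ ht

-- ===== VERDICT =====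
set_option maxHeartbeats 1000000 in
theorem solution_spec : Claim_equal_solution := by
  unfold Claim_equal_solution Spec_solution
  intro land P Q hdom hpre
  obtain ⟨hne, hrows⟩ := hpre
  simp only [solution, solution_alt]
  rw [pv_flatA land hrows, pv_flatB land hrows]
  have hclen : (land.flatMap (fun row => row.take land.length)).length
      = land.length * land.length := by
    rw [List.length_flatMap]
    have hc : ∀ row ∈ land, (row.take land.length).length = (fun _ : List Int => land.length) row := by
      intro row hr
      rw [List.length_take]
      exact min_eq_left (hrows row hr)
    rw [List.map_congr_left hc, List.map_const', List.sum_replicate, smul_eq_mul]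
  have hpos : 0 < land.length := List.length_pos_iff.mpr hne
  have hslen : (PySem.List.sorted (land.flatMap (fun row => row.take land.length))
      (fun x => x) false).length = land.length * land.length := by
    rw [PySem.List.length_sorted, hclen]
  have hmm : 0 < land.length * land.length := Nat.mul_pos hpos hpos
  have hcne : land.flatMap (fun row => row.take land.length) ≠ [] := by
    intro h
    have h0 : (land.flatMap (fun row => row.take land.length)).length = 0 := by rw [h]; rfl
    rw [hclen] at h0
    omega
  rw [show ((land.length : Int)) ^ 2
      = ((((PySem.List.sorted (land.flatMap (fun row => row.take land.length))
          (fun x => x) false).length - 1 : Nat)) : Int) + 1 from by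
    rw [hslen]
    have h1 : ((land.length : Int)) ^ 2 = ((land.length * land.length : Nat) : Int) := by
      push_cast; ring
    rw [h1]
    rcases Nat.exists_eq_add_of_lt hmm with ⟨m, hm⟩
    rw [hm]
    omega]
  rw [pv_core (land.flatMap (fun row => row.take land.length))
      (PySem.List.sorted (land.flatMap (fun row => row.take land.length)) (fun x => x) false)
      P Q hcne rfl]
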